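-- pv_equiv track=rewrite | github.com/MrBrantCode/unitest_baseline | mut_generate/mist_train_cf/cf_58189/solution.py | smallest_absolute_value
-- ===== SOURCE A (Python) =====
-- def smallest_absolute_value(lst):
--     """
--     This function finds the smallest absolute value in a list of integers
--     and returns its absolute value along with all its indexes.
--
--     Args:
--         lst (list): A list of integers.
--
--     Returns:
--         tuple: A tuple containing the smallest absolute value and a list of its indexes.
--     """
--     minimum_absolute_value = abs(lst[0])
--     index_of_minimum_value = [0]
--
--     for index, element in enumerate(lst[1:], 1):
--        absolute_value = abs(element)
--        if absolute_value < minimum_absolute_value: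
--            minimum_absolute_value = absolute_value
--            index_of_minimum_value = [index]
--        elif absolute_value == minimum_absolute_value:
--            index_of_minimum_value.append(index)
--
--     return (minimum_absolute_value, index_of_minimum_value)
-- ===== SOURCE B (Python) =====
-- def smallest_absolute_value(lst):
--     m = min(abs(x) for x in lst)
--     return (m, [i for i, x in enumerate(lst) if abs(x) == m])
-- ===== Notes on version B (the rewrite author's own statement) =====
-- stated objective: simpler
-- what changed: Replaces A's single accumulating scan (which maintains both the running minimum and a reset-or-append index list) with a two-pass decomposition: one pass computes the minimum absolute value, a comprehension collects all indices attaining it.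
-- outside the precondition, e.g. on smallest_absolute_value([]): A raises IndexError, B raises ValueError
import Mathlib
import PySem

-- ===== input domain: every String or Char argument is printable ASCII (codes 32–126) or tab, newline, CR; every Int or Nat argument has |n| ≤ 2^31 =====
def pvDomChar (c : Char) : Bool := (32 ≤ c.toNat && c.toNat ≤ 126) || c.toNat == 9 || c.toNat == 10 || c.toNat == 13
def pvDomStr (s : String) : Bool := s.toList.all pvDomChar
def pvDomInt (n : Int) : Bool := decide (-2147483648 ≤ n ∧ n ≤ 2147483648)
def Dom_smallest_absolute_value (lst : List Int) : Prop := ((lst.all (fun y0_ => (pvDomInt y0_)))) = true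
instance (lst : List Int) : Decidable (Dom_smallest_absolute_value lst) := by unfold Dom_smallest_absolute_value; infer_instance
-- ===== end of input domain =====

-- ===== PORT A =====
-- B is a two-pass decomposition of A (min pass, then index filter); equivalence proved on non-empty lists.
-- shared helper: Python's enumerate(xs, i) with Int indices
def pvEnum : List Int → Int → List (Int × Int)
  | [], _ => []
  | y :: ys, i => (y, i) :: pvEnum ys (i + 1)

def smallest_absolute_value (lst : List Int) : Int × List Int :=
  match lst with
  | [] => (0, [])  -- Python raises IndexError here; excluded by Pre_
  | x :: rest =>
    let st := (pvEnum rest 1).foldl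
      (fun (st : Int × List Int) yi =>
        if |yi.1| < st.1 then (|yi.1|, [yi.2])
        else if |yi.1| = st.1 then (st.1, st.2 ++ [yi.2])
        else st)
      (|x|, [0])
    (st.1, st.2)

-- ===== PORT B =====
def smallest_absolute_value_alt (lst : List Int) : Int × List Int :=
  match lst with
  | [] => (0, [])  -- Python raises ValueError here; excluded by Pre_
  | x :: rest =>
    let m := rest.foldl (fun a y => min a |y|) |x|
    (m, ((pvEnum lst 0).filter (fun p => |p.1| = m)).map Prod.snd)

-- ===== PRECONDITION & SPEC =====
-- Pre_ excludes the empty list, on which Python A raises IndexError (and B raises ValueError).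
def Pre_smallest_absolute_value (lst : List Int) : Prop := lst ≠ []
instance (lst : List Int) : Decidable (Pre_smallest_absolute_value lst) := by unfold Pre_smallest_absolute_value; infer_instance
def pvWitness_smallest_absolute_value : List Int := [3, -1, 1]
def Spec_smallest_absolute_value (lst : List Int) (out : Int × List Int) : Prop := out = smallest_absolute_value_alt lst
instance (lst : List Int) (out : Int × List Int) : Decidable (Spec_smallest_absolute_value lst out) := by unfold Spec_smallest_absolute_value; infer_instance

-- ===== CLAIM (what is proved, stated in full; the proofs are below) =====
def Claim_equal_smallest_absolute_value : Prop := ∀ (lst : List Int), Dom_smallest_absolute_value lst → Pre_smallest_absolute_value lst → Spec_smallest_absolute_value lst (smallest_absolute_value lst)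

-- ===== LEMMAS AND PROOFS =====

-- the loop invariant: A's fold from state (m, idxs) yields the running minimum m' and,
-- as index list, the old indices (kept iff m survives as the minimum) followed by all
-- indices of the enumerated suffix whose element attains m'.
theorem pvFold_char (rest : List Int) : ∀ (i m : Int) (idxs : List Int),
    (pvEnum rest i).foldl
      (fun (st : Int × List Int) yi =>
        if |yi.1| < st.1 then (|yi.1|, [yi.2])
        else if |yi.1| = st.1 then (st.1, st.2 ++ [yi.2])
        else st)
      (m, idxs)
    = (rest.foldl (fun a y => min a |y|) m,
       (if rest.foldl (fun a y => min a |y|) m = m then idxs else []) ++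
       ((pvEnum rest i).filter
          (fun p => |p.1| = rest.foldl (fun a y => min a |y|) m)).map Prod.snd) := by
  induction rest with
  | nil => intro i m idxs; simp [pvEnum]
  | cons y ys ih =>
    intro i m idxs
    have hle : ∀ (a : Int) (l : List Int), l.foldl (fun a y => min a |y|) a ≤ a := by
      intro a l
      induction l generalizing a with
      | nil => simp
      | cons z zs ihz =>
        calc (z :: zs).foldl (fun a y => min a |y|) a
            = zs.foldl (fun a y => min a |y|) (min a |z|) := by simp [List.foldl]
          _ ≤ min a |z| := ihz _
          _ ≤ a := min_le_left _ _
    simp only [pvEnum, List.foldl_cons, List.filter_cons]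
    by_cases h1 : |y| < m
    · rw [if_pos h1]
      rw [ih (i+1) |y| [i]]
      have hm' : (ys.foldl (fun a y => min a |y|) (min m |y|)) = ys.foldl (fun a y => min a |y|) |y| := by
        congr 1; omega
      have hne : ys.foldl (fun a y => min a |y|) |y| ≠ m := by
        have := hle |y| ys; omega
      simp only [hm']
      by_cases h2 : ys.foldl (fun a y => min a |y|) |y| = |y|
      · simp [h2]
        intro h; omega
      · have : ¬ (|y| = ys.foldl (fun a y => min a |y|) |y|) := fun h => h2 h.symm
        simp [h2, hne, this]
    · rw [if_neg h1]
      by_cases h2 : |y| = m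
      · rw [if_pos h2]
        rw [ih (i+1) m (idxs ++ [i])]
        have hm' : (ys.foldl (fun a y => min a |y|) (min m |y|)) = ys.foldl (fun a y => min a |y|) m := by
          congr 1; omega
        simp only [hm']
        by_cases h3 : ys.foldl (fun a y => min a |y|) m = m
        · have : |y| = ys.foldl (fun a y => min a |y|) m := by omega
          simp [h3, this]
        · have : ¬ (|y| = ys.foldl (fun a y => min a |y|) m) := by
            have := hle m ys; omega
          simp [h3, this]
      · rw [if_neg h2]
        rw [ih (i+1) m idxs]
        have hm' : (ys.foldl (fun a y => min a |y|) (min m |y|)) = ys.foldl (fun a y => min a |y|) m := by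
          congr 1; omega
        simp only [hm']
        have : ¬ (|y| = ys.foldl (fun a y => min a |y|) m) := by
          have := hle m ys; omega
        simp [this]

-- ===== VERDICT (by name: the statement is the Claim_ definition above) =====
theorem smallest_absolute_value_spec : Claim_equal_smallest_absolute_value := by
  intro lst _ hpre
  unfold Spec_smallest_absolute_value smallest_absolute_value smallest_absolute_value_alt
  match lst with
  | [] => exact absurd rfl hpre
  | x :: rest =>
    simp only
    rw [pvFold_char rest 1 |x| [0]]
    have hxenum : pvEnum (x :: rest) 0 = (x, 0) :: pvEnum rest 1 := by simp [pvEnum]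
    rw [hxenum, List.filter_cons]
    by_cases h : rest.foldl (fun a y => min a |y|) |x| = |x|
    · simp [h]
    · have : ¬ (|x| = rest.foldl (fun a y => min a |y|) |x|) := fun hh => h hh.symm
      simp [h, this]
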